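-- pv_equiv track=rewrite | github.com/dagisky/CBM_NEWSQA | data.py | get_char_answer_range
-- ===== SOURCE A (Python) =====
-- def get_char_answer_range(ans_ranges):
--     char_answer= []
--     for crowdsourcer_ans in ans_ranges.split("|"):
--         for ans in crowdsourcer_ans.split(","):
--             ans = list(ans.split(":"))
--             if ans != ['None']:
--                 for i in range(len(ans)):
--                     ans[i] = int(ans[i])
--                 char_answer.append(ans)
--             else:
--                 char_answer.append(None)
--     return char_answer
-- ===== SOURCE B (Python) =====
-- def get_char_answer_range(ans_ranges):
--     def conv(parts):
--         return None if parts == ['None'] else [int(p) for p in parts]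
--     char_answer = []
--     parts = []
--     cur = []
--     for ch in ans_ranges:
--         if ch == '|' or ch == ',':
--             parts.append(''.join(cur))
--             char_answer.append(conv(parts))
--             parts = []
--             cur = []
--         elif ch == ':':
--             parts.append(''.join(cur))
--             cur = []
--         else:
--             cur.append(ch)
--     parts.append(''.join(cur))
--     char_answer.append(conv(parts))
--     return char_answer
-- ===== Notes on version B (the rewrite author's own statement) =====
-- stated objective: alternative
-- what changed: Replaces A's three-level split-based tokenization (split('|'), split(','), split(':')) with a single character-level state machine: one pass over the string maintaining the current part, the current list of parts and the output, flushing on ':' and on ','/'|'.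
import Mathlib
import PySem

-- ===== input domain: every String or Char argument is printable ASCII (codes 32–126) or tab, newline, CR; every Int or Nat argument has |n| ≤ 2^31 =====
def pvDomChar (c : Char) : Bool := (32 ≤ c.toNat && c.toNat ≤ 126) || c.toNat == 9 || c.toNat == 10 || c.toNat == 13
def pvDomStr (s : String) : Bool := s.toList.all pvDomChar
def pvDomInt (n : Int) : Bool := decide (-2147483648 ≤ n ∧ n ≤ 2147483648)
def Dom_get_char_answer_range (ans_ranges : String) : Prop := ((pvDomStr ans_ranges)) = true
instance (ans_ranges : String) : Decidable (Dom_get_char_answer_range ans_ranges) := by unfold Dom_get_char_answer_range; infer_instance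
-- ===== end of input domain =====

-- B replaces A's nested split('|')/split(',')/split(':') tokenization with a single character-level state-machine pass (objective: alternative; return value only).


-- ===== PORT A =====
def get_char_answer_range (ans_ranges : String) : List (Option (List Int)) :=
  (PySem.Chars.splitOn ans_ranges.toList ['|']).foldl (fun char_answer crowdsourcer_ans =>
    (PySem.Chars.splitOn crowdsourcer_ans [',']).foldl (fun ca ans0 =>
      let ans := PySem.Chars.splitOn ans0 [':']
      if ans ≠ [['N', 'o', 'n', 'e']] then
        -- for i in range(len(ans)): ans[i] = int(ans[i])  (int() raises outside Pre_; .getD 0 is never reached inside Pre_)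
        ca ++ [some ((PySem.List.pyRange 0 (PySem.List.len ans)).map
          (fun i => (PySem.Int.ofChars? (PySem.List.pyGetD ans i [])).getD 0))]
      else ca ++ [none]) char_answer) []

-- ===== PORT B =====
-- conv(parts): None if parts == ['None'] else [int(p) for p in parts]
def pvConv (parts : List (List Char)) : Option (List Int) :=
  if parts = [['N', 'o', 'n', 'e']] then none
  else some (parts.map (fun p => (PySem.Int.ofChars? p).getD 0))

-- the state machine: cur = current part, parts = parts of the current token, out = char_answer
def pvScan (l : List Char) (cur : List Char) (parts : List (List Char))
    (out : List (Option (List Int))) : List (Option (List Int)) :=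
  match l with
  | [] => out ++ [pvConv (parts ++ [cur])]
  | ch :: t =>
    if ch = '|' ∨ ch = ',' then pvScan t [] [] (out ++ [pvConv (parts ++ [cur])])
    else if ch = ':' then pvScan t [] (parts ++ [cur]) out
    else pvScan t (cur ++ [ch]) parts out

def get_char_answer_range_alt (ans_ranges : String) : List (Option (List Int)) :=
  pvScan ans_ranges.toList [] [] []

-- ===== PRECONDITION & SPEC =====
-- Pre_ excludes exactly the inputs on which Python A raises ValueError: a non-'None' token with a colon-part int() cannot parse (B raises there too).
def Pre_get_char_answer_range (ans_ranges : String) : Prop :=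
  ∀ tok ∈ (PySem.Chars.splitOn ans_ranges.toList ['|']).flatMap (fun cs => PySem.Chars.splitOn cs [',']),
    PySem.Chars.splitOn tok [':'] = [['N', 'o', 'n', 'e']] ∨
      ∀ p ∈ PySem.Chars.splitOn tok [':'], (PySem.Int.ofChars? p).isSome = true
instance (ans_ranges : String) : Decidable (Pre_get_char_answer_range ans_ranges) := by
  unfold Pre_get_char_answer_range; infer_instance
def pvWitness_get_char_answer_range : String := "0:5,None|3:9"

def Spec_get_char_answer_range (ans_ranges : String) (out : List (Option (List Int))) : Prop := out = get_char_answer_range_alt ans_ranges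
instance (ans_ranges : String) (out : List (Option (List Int))) : Decidable (Spec_get_char_answer_range ans_ranges out) := by unfold Spec_get_char_answer_range; infer_instance

-- ===== CLAIM (what is proved, stated in full; the proofs are below) =====
def Claim_equal_get_char_answer_range : Prop := ∀ (ans_ranges : String), Dom_get_char_answer_range ans_ranges → Pre_get_char_answer_range ans_ranges → Spec_get_char_answer_range ans_ranges (get_char_answer_range ans_ranges)

-- ===== LEMMAS AND PROOFS =====

-- clean recursive single-character splitter (proof-only helper)
def spC (c : Char) : List Char → List (List Char)
  | [] => [[]]
  | a :: t =>
    match spC c t with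
    | [] => [[]]
    | h :: r => if a = c then [] :: h :: r else (a :: h) :: r

theorem spC_ne_nil (c : Char) (l : List Char) : spC c l ≠ [] := by
  cases l with
  | nil => simp [spC]
  | cons a t =>
    simp only [spC]
    split
    · simp
    · split <;> simp

theorem spC_cons (c a : Char) (t : List Char) :
    spC c (a :: t) = if a = c then [] :: spC c t
      else (a :: (spC c t).headI) :: (spC c t).tail := by
  rcases h : spC c t with _ | ⟨x, xs⟩
  · exact absurd h (spC_ne_nil c t)
  · simp only [spC, h]
    split <;> simp

theorem splitOn_go_single (c : Char) : ∀ (fuel : Nat) (l cur : List Char) (acc : List (List Char)),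
    l.length ≤ fuel →
    PySem.Chars.splitOn.go [c] fuel l cur acc = acc.reverse ++ (spC c l).modifyHead (cur.reverse ++ ·) := by
  intro fuel
  induction fuel with
  | zero =>
    intro l cur acc hl
    have : l = [] := by cases l <;> simp_all
    subst this
    simp [PySem.Chars.splitOn.go, spC]
  | succ n ih =>
    intro l cur acc hl
    cases l with
    | nil => simp [PySem.Chars.splitOn.go, spC]
    | cons a t =>
      have hp : List.isPrefixOf [c] (a :: t) = (c == a) := by
        simp [List.isPrefixOf]
      by_cases hac : a = c
      · subst hac
        rw [show PySem.Chars.splitOn.go [a] (n+1) (a :: t) cur acc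
              = PySem.Chars.splitOn.go [a] n t [] (cur.reverse :: acc) by
            simp [PySem.Chars.splitOn.go, hp]]
        rw [ih t [] (cur.reverse :: acc) (by simpa using hl)]
        rcases h : spC a t with _ | ⟨h', r⟩
        · exact absurd h (spC_ne_nil a t)
        · simp [spC, h]
      · rw [show PySem.Chars.splitOn.go [c] (n+1) (a :: t) cur acc
              = PySem.Chars.splitOn.go [c] n t (a :: cur) acc by
            simp [PySem.Chars.splitOn.go, hp, Ne.symm hac]]
        rw [ih t (a :: cur) acc (by simpa using hl)]
        rcases h : spC c t with _ | ⟨h', r⟩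
        · exact absurd h (spC_ne_nil c t)
        · simp [spC, h, hac]

theorem splitOn_single (l : List Char) (c : Char) :
    PySem.Chars.splitOn l [c] = spC c l := by
  rw [PySem.Chars.splitOn, splitOn_go_single c (l.length + 1) l [] [] (by omega)]
  rcases h : spC c l with _ | ⟨h', r⟩
  · exact absurd h (spC_ne_nil c l)
  · simp

-- proof-only character substitution used to flatten A's two outer splits
def swPipe (ch : Char) : Char := if ch = '|' then ',' else ch

-- the flattening identity: split on ',' after '|'→',' = split on '|', then each piece on ','
theorem spC_flatten (l : List Char) :
    spC ',' (l.map swPipe) = (spC '|' l).flatMap (spC ',') := by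
  induction l with
  | nil => simp [spC]
  | cons a t ih =>
    rcases h : spC '|' t with _ | ⟨h1, r1⟩
    · exact absurd h (spC_ne_nil '|' t)
    by_cases ha : a = '|'
    · subst ha
      rw [show List.map swPipe ('|' :: t) = ',' :: List.map swPipe t by simp [swPipe],
          spC_cons, if_pos rfl, ih, h, spC_cons, if_pos rfl]
      simp [spC, h]
    · rw [show List.map swPipe (a :: t) = a :: List.map swPipe t by simp [swPipe, ha],
        spC_cons, ih, h, spC_cons, if_neg ha]
      by_cases hc : a = ','
      · subst hc
        rw [if_pos rfl]
        simp [h, List.flatMap_cons, spC_cons]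
      · rw [if_neg hc]
        rcases h2 : spC ',' h1 with _ | ⟨h2', r2⟩
        · exact absurd h2 (spC_ne_nil ',' h1)
        simp [h, h2, List.flatMap_cons, spC_cons, hc]

-- per-token agreement of A's conversion branch with pvConv
theorem token_conv (ans : List (List Char)) :
    (if ans ≠ [['N', 'o', 'n', 'e']] then
       (some ((PySem.List.pyRange 0 (PySem.List.len ans)).map
         (fun i => (PySem.Int.ofChars? (PySem.List.pyGetD ans i [])).getD 0)) : Option (List Int))
     else none)
    = pvConv ans := by
  have hmap : (PySem.List.pyRange 0 (PySem.List.len ans)).map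
      (fun i => (PySem.Int.ofChars? (PySem.List.pyGetD ans i [])).getD 0)
      = ans.map (fun x => (PySem.Int.ofChars? x).getD 0) := by
    rw [show ((PySem.List.pyRange 0 (PySem.List.len ans)).map
          (fun i => (PySem.Int.ofChars? (PySem.List.pyGetD ans i [])).getD 0))
        = ((PySem.List.pyRange 0 (PySem.List.len ans)).map
            (fun j => PySem.List.pyGetD ans j [])).map
              (fun x => (PySem.Int.ofChars? x).getD 0) by rw [List.map_map]; rfl]
    rw [PySem.List.map_pyGetD_pyRange_zero]
  rw [hmap]
  unfold pvConv
  split_ifs with h1 h2 <;> simp_all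

-- A in terms of the flattened token list
theorem A_char (s : String) :
    get_char_answer_range s
      = (spC ',' (s.toList.map swPipe)).map (fun tok => pvConv (spC ':' tok)) := by
  unfold get_char_answer_range
  simp only [splitOn_single]
  rw [spC_flatten]
  have hinner : ∀ (init : List (Option (List Int))) (cs : List Char),
      (spC ',' cs).foldl (fun ca ans0 =>
        let ans := spC ':' ans0
        if ans ≠ [['N', 'o', 'n', 'e']] then
          ca ++ [some ((PySem.List.pyRange 0 (PySem.List.len ans)).map
            (fun i => (PySem.Int.ofChars? (PySem.List.pyGetD ans i [])).getD 0))]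
        else ca ++ [none]) init
      = init ++ (spC ',' cs).map (fun tok => pvConv (spC ':' tok)) := by
    intro init cs
    rw [PySem.List.foldl_congr_mem _ _
      (fun ca tok => ca ++ [pvConv (spC ':' tok)]) init
      (by intro acc x _
          simp only
          rw [← token_conv (spC ':' x)]
          split <;> rfl)]
    exact PySem.List.foldl_append_singleton_eq_map _ _ _
  rw [PySem.List.foldl_congr_mem _ _
      (fun ca cs => ca ++ (spC ',' cs).map (fun tok => pvConv (spC ':' tok))) []
      (by intro acc x _; exact hinner acc x)]
  rw [PySem.List.foldl_append_eq_flatMap, List.map_flatMap]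
  simp

-- splitting past a delimiter-free prefix
theorem spC_append_not_mem (c : Char) (xs ys : List Char) (hx : c ∉ xs) :
    spC c (xs ++ ys) = (spC c ys).modifyHead (xs ++ ·) := by
  induction xs with
  | nil =>
    rcases h : spC c ys with _ | ⟨h', r⟩
    · exact absurd h (spC_ne_nil c ys)
    · simp [h]
  | cons a t ih =>
    have ha : a ≠ c := by intro e; exact hx (by simp [e])
    have ht : c ∉ t := fun m => hx (by simp [m])
    rw [List.cons_append, spC_cons, if_neg ha, ih ht]
    rcases h : spC c ys with _ | ⟨h', r⟩
    · exact absurd h (spC_ne_nil c ys)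
    · simp [h]

-- the state-machine invariant
theorem scan_spec : ∀ (l cur : List Char) (parts : List (List Char))
    (out : List (Option (List Int))),
    ':' ∉ cur → ',' ∉ cur → '|' ∉ cur →
    pvScan l cur parts out
      = out ++ pvConv (parts ++ spC ':' (cur ++ (spC ',' (l.map swPipe)).headI))
          :: ((spC ',' (l.map swPipe)).tail).map (fun tok => pvConv (spC ':' tok)) := by
  intro l
  induction l with
  | nil =>
    intro cur parts out hc _ _
    have hcur : spC ':' cur = [cur] := by
      simpa [spC] using spC_append_not_mem ':' cur [] hc
    simp [pvScan, spC, hcur]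
  | cons ch t ih =>
    intro cur parts out hc hcm hcp
    rcases h : spC ',' (t.map swPipe) with _ | ⟨h1, r1⟩
    · exact absurd h (spC_ne_nil _ _)
    by_cases hd : ch = '|' ∨ ch = ','
    · have hsw : swPipe ch = ',' := by
        rcases hd with e | e <;> simp [e, swPipe]
      have hcur : spC ':' cur = [cur] := by
        simpa [spC] using spC_append_not_mem ':' cur [] hc
      rw [pvScan, if_pos hd, ih [] [] _ (by simp) (by simp) (by simp)]
      rw [show List.map swPipe (ch :: t) = ',' :: t.map swPipe by simp [hsw]]
      rw [spC_cons, if_pos rfl, h]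
      simp [hcur]
    · push_neg at hd
      have hsw : swPipe ch = ch := by simp [swPipe, hd.1]
      rw [show List.map swPipe (ch :: t) = ch :: t.map swPipe by simp [hsw]]
      rw [spC_cons, if_neg hd.2, h]
      by_cases hcol : ch = ':'
      · subst hcol
        have hsplit : spC ':' (cur ++ ':' :: h1) = cur :: spC ':' h1 := by
          have hm := spC_append_not_mem ':' cur (':' :: h1) hc
          rw [spC_cons, if_pos rfl] at hm
          simpa using hm
        rw [pvScan, if_neg (by simp [hd.1, hd.2]), if_pos rfl,
          ih [] (parts ++ [cur]) out (by simp) (by simp) (by simp), h]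
        simp [hsplit]
      · have h1m : ':' ∉ cur ++ [ch] := by
          intro m
          rcases List.mem_append.1 m with m | m
          · exact hc m
          · exact hcol (List.mem_singleton.1 m).symm
        have h2m : ',' ∉ cur ++ [ch] := by
          intro m
          rcases List.mem_append.1 m with m | m
          · exact hcm m
          · exact hd.2 (List.mem_singleton.1 m).symm
        have h3m : '|' ∉ cur ++ [ch] := by
          intro m
          rcases List.mem_append.1 m with m | m
          · exact hcp m
          · exact hd.1 (List.mem_singleton.1 m).symm
        rw [pvScan, if_neg (by simp [hd.1, hd.2]), if_neg hcol,
          ih (cur ++ [ch]) parts out h1m h2m h3m, h]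
        simp

-- B in terms of the flattened token list
theorem B_char (s : String) :
    get_char_answer_range_alt s
      = (spC ',' (s.toList.map swPipe)).map (fun tok => pvConv (spC ':' tok)) := by
  unfold get_char_answer_range_alt
  rw [scan_spec s.toList [] [] [] (by simp) (by simp) (by simp)]
  rcases h : spC ',' (s.toList.map swPipe) with _ | ⟨h1, r1⟩
  · exact absurd h (spC_ne_nil _ _)
  · simp [h]

-- ===== VERDICT (by name: the statement is the Claim_ definition above) =====
theorem get_char_answer_range_spec : Claim_equal_get_char_answer_range := by
  intro s _ _
  unfold Spec_get_char_answer_range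
  rw [A_char, B_char]
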